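-- pv_equiv track=rewrite | github.com/semmelweis-pharmacology/deepvigilace | code/lib/preprocessing.py | separate_hier_by_tiers
-- ===== SOURCE A (Python) =====
-- def sort_dict(in_dict):
--
--     keys = list(in_dict.keys())
--     keys.sort()
--     sorted_dict = {i: in_dict[i] for i in keys}
--
--     return sorted_dict
--
-- def separate_hier_by_tiers(hier_dict):
--
--     tier_dicts = {}
--
--     for tier in hier_dict[next(iter(hier_dict))][0].keys():
--         tier_dict = {}
--         tier_dict_dedup = {}
--
--         for key, value in hier_dict.items():
--             tier_dict_dedup[key] = {}
--
--             for entry in value: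
--                 tier_dict_dedup[key][entry[tier]] = 1
--
--         for key, value in tier_dict_dedup.items():
--             tier_dict[key] = ""
--             sdict = sort_dict(value)
--
--             for entry in sdict.keys():
--                 tier_dict[key] += ' | ' + entry
--
--         tier_dicts[tier] = tier_dict
--
--     return tier_dicts
-- ===== SOURCE B (Python) =====
-- def separate_hier_by_tiers(hier_dict):
--     tiers = list(hier_dict[next(iter(hier_dict))][0].keys())
--     keys = list(hier_dict)
--     K = len(keys)
--     pairs = set()
--     for ki, entries in enumerate(hier_dict.values()):
--         for entry in entries:
--             for ti, tier in enumerate(tiers):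
--                 pairs.add((ti * K + ki, entry[tier]))
--     strings = [''] * (len(tiers) * K)
--     for cell, val in sorted(pairs):
--         strings[cell] += ' | ' + val
--     return {tier: {key: strings[ti * K + ki] for ki, key in enumerate(keys)}
--             for ti, tier in enumerate(tiers)}
-- ===== Notes on version B (the rewrite author's own statement) =====
-- stated objective: alternative
-- what changed: B replaces A's tier-major re-scans with per-cell dedup dicts and per-cell sorts by a flat formulation: it collects one global set of (tier*K+key, value) index pairs in a single pass, sorts that whole set once lexicographically, folds the sorted pairs into a flat string array in one scan, and only then reshapes the array into the nested dicts.
import Mathlib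
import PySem

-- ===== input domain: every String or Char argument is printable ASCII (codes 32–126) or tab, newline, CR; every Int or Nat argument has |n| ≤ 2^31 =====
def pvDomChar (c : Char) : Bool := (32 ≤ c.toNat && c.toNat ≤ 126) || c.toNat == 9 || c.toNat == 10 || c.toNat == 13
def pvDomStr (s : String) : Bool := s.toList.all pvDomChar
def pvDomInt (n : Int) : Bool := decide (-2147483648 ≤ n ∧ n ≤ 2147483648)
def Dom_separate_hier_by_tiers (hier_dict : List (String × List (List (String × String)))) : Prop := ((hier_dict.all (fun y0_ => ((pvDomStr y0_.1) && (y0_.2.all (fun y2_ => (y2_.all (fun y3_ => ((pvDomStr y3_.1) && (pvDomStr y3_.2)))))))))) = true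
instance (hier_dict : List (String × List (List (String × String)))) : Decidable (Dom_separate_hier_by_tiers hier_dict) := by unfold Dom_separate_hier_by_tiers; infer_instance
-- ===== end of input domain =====

-- B flattens the task: one global set of (tier*K+key, value) index pairs, one lexicographic sort of
-- that set, one scan folding it into a flat string array, then a reshape — instead of A's per-tier
-- re-scans with per-cell dedup dicts and per-cell sorts (objective: alternative algorithm, same cost class).

-- ===== PORT A =====
def sort_dict (in_dict : PySem.Dict String Int) : PySem.Dict String Int :=
  let keys := PySem.List.sorted in_dict.keys (fun x => x) false
  PySem.Dict.ofList (keys.map (fun i => (i, in_dict.getD i 0)))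

def separate_hier_by_tiers (hier_dict : List (String × List (List (String × String)))) : List (String × List (String × String)) :=
  let d : PySem.Dict String (List (List (String × String))) := PySem.Dict.mk hier_dict
  -- hier_dict[next(iter(hier_dict))][0]: Pre_ excludes the empty dict (StopIteration) and an empty first list (IndexError)
  let firstEntry := (d.getD (d.keys.headD "") []).headD []
  let tier_dicts := (PySem.Dict.mk firstEntry).keys.foldl
    (fun (tds : PySem.Dict String (PySem.Dict String String)) tier =>
      let tier_dict_dedup := d.items.foldl
        (fun (dd : PySem.Dict String (PySem.Dict String Int)) kv =>
          dd.insert kv.1 (kv.2.foldl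
            (fun (ed : PySem.Dict String Int) entry =>
              -- entry[tier]: Pre_ excludes entries missing a tier key (KeyError)
              ed.insert ((PySem.Dict.mk entry).getD tier "") 1) PySem.Dict.empty))
        PySem.Dict.empty
      let tier_dict := tier_dict_dedup.items.foldl
        (fun (td : PySem.Dict String String) kv =>
          let td := td.insert kv.1 ""
          let sdict := sort_dict kv.2
          sdict.keys.foldl
            (fun (td : PySem.Dict String String) entry =>
              td.insert kv.1 (td.getD kv.1 "" ++ (" | " ++ entry))) td)
        PySem.Dict.empty
      tds.insert tier tier_dict)
    PySem.Dict.empty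
  tier_dicts.items.map (fun p => (p.1, p.2.items))

-- ===== PORT B =====
def separate_hier_by_tiers_alt (hier_dict : List (String × List (List (String × String)))) : List (String × List (String × String)) :=
  let d : PySem.Dict String (List (List (String × String))) := PySem.Dict.mk hier_dict
  let tiers := (PySem.Dict.mk ((d.getD (d.keys.headD "") []).headD [])).keys
  let keys := d.keys
  let K : Int := keys.length
  let pairs : PySem.Set (Int × String) :=
    (PySem.List.enumerate d.values).foldl
      (fun pairs kiEntries =>
        kiEntries.2.foldl
          (fun pairs entry =>
            (PySem.List.enumerate tiers).foldl
              (fun (pairs : PySem.Set (Int × String)) tit =>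
                PySem.Set.add pairs (tit.1 * K + kiEntries.1, (PySem.Dict.mk entry).getD tit.2 ""))
              pairs)
          pairs)
      PySem.Set.empty
  let sortedPairs := PySem.List.sorted2 pairs (fun p => p.1) (fun p => p.2) false
  let strings := sortedPairs.foldl
    (fun (ss : List String) cv =>
      PySem.List.pySetD ss cv.1 (PySem.List.pyGetD ss cv.1 "" ++ (" | " ++ cv.2)))
    (List.replicate (tiers.length * keys.length) "")
  (PySem.Dict.ofList ((PySem.List.enumerate tiers).map (fun tit => (tit.2,
    (PySem.Dict.ofList ((PySem.List.enumerate keys).map (fun kik =>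
      (kik.2, PySem.List.pyGetD strings (tit.1 * K + kik.1) "")))).items)))).items

-- ===== PRECONDITION & SPEC =====
-- Pre_ excludes exactly the inputs where Python A raises (empty dict → StopIteration, empty first value
-- list → IndexError, an entry missing a tier key → KeyError) and association lists with duplicate keys at
-- the top level or inside an entry, which do not represent Python dicts.
def Pre_separate_hier_by_tiers (hier_dict : List (String × List (List (String × String)))) : Prop :=
  hier_dict ≠ [] ∧ (hier_dict.map Prod.fst).Nodup ∧
  (hier_dict.headD ("", [])).2 ≠ [] ∧
  (∀ p ∈ hier_dict, ∀ e ∈ p.2, (e.map Prod.fst).Nodup ∧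
    ∀ t ∈ ((hier_dict.headD ("", [])).2.headD []).map Prod.fst, t ∈ e.map Prod.fst)

instance (hier_dict : List (String × List (List (String × String)))) : Decidable (Pre_separate_hier_by_tiers hier_dict) := by unfold Pre_separate_hier_by_tiers; infer_instance

def pvWitness_separate_hier_by_tiers : (List (String × List (List (String × String)))) :=
  [("k1", [[("t1", "b"), ("t2", "x")], [("t1", "a"), ("t2", "y")]]), ("k2", [])]

def Spec_separate_hier_by_tiers (hier_dict : List (String × List (List (String × String)))) (out : List (String × List (String × String))) : Prop := out = separate_hier_by_tiers_alt hier_dict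
instance (hier_dict : List (String × List (List (String × String)))) (out : List (String × List (String × String))) : Decidable (Spec_separate_hier_by_tiers hier_dict out) := by unfold Spec_separate_hier_by_tiers; infer_instance

-- ===== CLAIM (what is proved, stated in full; the proofs are below) =====
def Claim_equal_separate_hier_by_tiers : Prop := ∀ (hier_dict : List (String × List (List (String × String)))), Dom_separate_hier_by_tiers hier_dict → Pre_separate_hier_by_tiers hier_dict → Spec_separate_hier_by_tiers hier_dict (separate_hier_by_tiers hier_dict)

-- ===== LEMMAS AND PROOFS =====

-- the value an entry contributes for tier t
def pvVal (t : String) (e : List (String × String)) : String := (PySem.Dict.mk e).getD t ""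

-- sorted distinct values of one (tier, key) cell
def pvSorted (t : String) (es : List (List (String × String))) : List String :=
  PySem.List.sorted (PySem.Set.ofList (es.map (pvVal t))) (fun x => x) false

-- ' | '-prefixed concatenation
def pvStrcat (vs : List String) : String := PySem.Str.join "" (vs.map (fun v => " | " ++ v))

-- the output string for tier t and one key's entry list
def pvStr (t : String) (entries : List (List (String × String))) : String :=
  pvStrcat (pvSorted t entries)

-- the common canonical form of both ports
def pvCanon (tiers : List String) (h : List (String × List (List (String × String)))) :
    List (String × List (String × String)) :=
  tiers.map (fun t => (t, h.map (fun kv => (kv.1, pvStr t kv.2))))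

-- B-side canonical structures: per-cell blocks, the flat pair list, the sorted pair list
def pvBlocks (K : Int) (T : List String) (hs : List (String × List (List (String × String)))) :
    List (Int × List String) :=
  (PySem.List.enumerate T).flatMap (fun tit =>
    (PySem.List.enumerate hs).map (fun kie => (tit.1 * K + kie.1, pvSorted tit.2 kie.2.2)))

def pvC (K : Int) (T : List String) (hs : List (String × List (List (String × String)))) :
    List (Int × String) :=
  (pvBlocks K T hs).flatMap (fun b => b.2.map (fun v => (b.1, v)))

def pvLflat (K : Int) (T : List String) (hs : List (String × List (List (String × String)))) :
    List (Int × String) :=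
  (PySem.List.enumerate hs).flatMap (fun kie =>
    kie.2.2.flatMap (fun e =>
      (PySem.List.enumerate T).map (fun tit => (tit.1 * K + kie.1, pvVal tit.2 e))))

-- the per-pair update and per-block update of the flat string array
def pvOpA (ss : List String) (cv : Int × String) : List String :=
  PySem.List.pySetD ss cv.1 (PySem.List.pyGetD ss cv.1 "" ++ (" | " ++ cv.2))

def pvOp2 (ss : List String) (b : Int × List String) : List String :=
  PySem.List.pySetD ss b.1 (PySem.List.pyGetD ss b.1 "" ++ pvStrcat b.2)

-- ===== A-side lemmas (A = pvCanon) =====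

theorem pv_first (h : List (String × List (List (String × String)))) (hne : h ≠ []) :
    ((PySem.Dict.mk h).getD ((PySem.Dict.mk h).keys.headD "") []) = (h.headD ("",[])).2 := by
  cases h with
  | nil => exact absurd rfl hne
  | cons p r =>
    obtain ⟨k, v⟩ := p
    simp [PySem.Dict.keys, PySem.Dict.getD_eq_get?_getD, PySem.Dict.get?_mk_cons]

theorem pv_join_cons (x : String) (xs : List String) :
    PySem.Str.join "" (x :: xs) = x ++ PySem.Str.join "" xs := by
  have h : (PySem.Str.join "" (x :: xs)).toList = (x ++ PySem.Str.join "" xs).toList := by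
    simp [PySem.Str.toList_join, PySem.Chars.join, List.intercalate]
    cases xs <;> simp
  exact String.toList_injective h

theorem pv_g_join (es : List String) (s : String) :
    es.foldl (fun s e => s ++ (" | " ++ e)) s = s ++ PySem.Str.join "" (es.map (fun v => " | " ++ v)) := by
  induction es generalizing s with
  | nil => simp [PySem.Str.join, PySem.Chars.join, List.intercalate]
  | cons e es ih =>
    simp only [List.foldl_cons, List.map_cons, ih, pv_join_cons, String.append_assoc]

theorem pv_strfold (es : List String) (k : String) (s : String) (td : PySem.Dict String String) :
    es.foldl (fun td e => td.insert k (td.getD k "" ++ (" | " ++ e))) (td.insert k s)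
    = td.insert k (es.foldl (fun s e => s ++ (" | " ++ e)) s) := by
  induction es generalizing s td with
  | nil => rfl
  | cons e es ih =>
    simp only [List.foldl_cons, PySem.Dict.getD_insert_self, PySem.Dict.insert_insert_self]
    exact ih _ _

theorem pv_items_map {α : Type} [BEq α] [LawfulBEq α] {β γ : Type}
    (l : List (α × β)) (f : α × β → γ) (hnd : (l.map Prod.fst).Nodup) :
    (l.foldl (fun d kv => d.insert kv.1 (f kv)) PySem.Dict.empty).items
      = l.map (fun kv => (kv.1, f kv)) := by
  have := PySem.Dict.items_foldl_insert_fresh (l := l) (k := Prod.fst) (v := f)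
    (d := PySem.Dict.empty) (by intro a _; simp [PySem.Dict.contains_empty]) hnd
  simpa [PySem.Dict.items] using this

theorem pv_items_ofList {α : Type} [BEq α] [LawfulBEq α] {β : Type}
    (l : List (α × β)) (hnd : (l.map Prod.fst).Nodup) :
    (PySem.Dict.ofList l).items = l := by
  have h0 : PySem.Dict.ofList l = l.foldl (fun d kv => d.insert kv.1 kv.2) PySem.Dict.empty := rfl
  have h2 := pv_items_map l (fun kv => kv.2) hnd
  rw [h0]
  simpa using h2

theorem pv_inner_keys (t : String) (v : List (List (String × String))) :
    (v.foldl (fun (ed : PySem.Dict String Int) e =>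
        ed.insert ((PySem.Dict.mk e).getD t "") 1) PySem.Dict.empty).keys
      = PySem.Set.ofList (v.map (pvVal t)) := by
  have := PySem.Dict.keys_foldl_insert_key (l := v)
    (key := fun e => (PySem.Dict.mk e).getD t "") (f := fun _ _ => (1 : Int))
    (d := PySem.Dict.empty)
  simpa [PySem.Dict.keys_empty, PySem.Set.update_nil_left, pvVal] using this

theorem pv_sortdict_keys (dd : PySem.Dict String Int) (hnd : dd.keys.Nodup) :
    (sort_dict dd).keys = PySem.List.sorted dd.keys (fun x => x) false := by
  have hnd2 : (PySem.List.sorted dd.keys (fun x => x) false).Nodup :=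
    ((PySem.List.sorted_perm (xs := dd.keys) (key := fun x => x) (rev := false)).nodup_iff).mpr hnd
  have h := pv_items_ofList
    (l := (PySem.List.sorted dd.keys (fun x => x) false).map (fun i => (i, dd.getD i 0)))
    (by
      have : (((PySem.List.sorted dd.keys (fun x => x) false).map (fun i => (i, dd.getD i 0))).map Prod.fst)
          = PySem.List.sorted dd.keys (fun x => x) false := by
        simp [List.map_map, Function.comp_def]
      rw [this]; exact hnd2)
  have hs : sort_dict dd
      = PySem.Dict.ofList ((PySem.List.sorted dd.keys (fun x => x) false).map (fun i => (i, dd.getD i 0))) := rfl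
  rw [hs]
  show (PySem.Dict.ofList _).items.map Prod.fst = _
  rw [h]
  simp [List.map_map, Function.comp_def]

theorem pv_tierdict_fold (rows : List (String × PySem.Dict String Int)) :
    rows.foldl (fun (td : PySem.Dict String String) kv =>
        (sort_dict kv.2).keys.foldl (fun td e => td.insert kv.1 (td.getD kv.1 "" ++ (" | " ++ e)))
          (td.insert kv.1 "")) PySem.Dict.empty
    = rows.foldl (fun td kv => td.insert kv.1
        ((sort_dict kv.2).keys.foldl (fun s e => s ++ (" | " ++ e)) "")) PySem.Dict.empty := by
  have hb : (fun (td : PySem.Dict String String) (kv : String × PySem.Dict String Int) =>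
      (sort_dict kv.2).keys.foldl (fun td e => td.insert kv.1 (td.getD kv.1 "" ++ (" | " ++ e)))
        (td.insert kv.1 "")) = (fun td kv => td.insert kv.1
        ((sort_dict kv.2).keys.foldl (fun s e => s ++ (" | " ++ e)) "")) := by
    funext td kv; exact pv_strfold _ _ _ _
  rw [hb]

theorem pv_A_string (t : String) (v : List (List (String × String))) :
    ((sort_dict (v.foldl (fun (ed : PySem.Dict String Int) e =>
        ed.insert ((PySem.Dict.mk e).getD t "") 1) PySem.Dict.empty)).keys).foldl
      (fun s e => s ++ (" | " ++ e)) "" = pvStr t v := by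
  rw [pv_sortdict_keys _ (by rw [pv_inner_keys]; exact PySem.Set.nodup_ofList _), pv_inner_keys,
    pv_g_join]
  simp [pvStr, pvStrcat, pvSorted]

theorem pv_items_map' {α : Type} [BEq α] [LawfulBEq α] {γ : Type}
    (l : List α) (f : α → γ) (hnd : l.Nodup) :
    (l.foldl (fun d x => d.insert x (f x)) PySem.Dict.empty).items
      = l.map (fun x => (x, f x)) := by
  have := PySem.Dict.items_foldl_insert_fresh (l := l) (k := fun a => a) (v := f)
    (d := PySem.Dict.empty) (by intro a _; simp [PySem.Dict.contains_empty]) (by simpa using hnd)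
  simpa [PySem.Dict.items] using this

theorem pv_A_canon (h : List (String × List (List (String × String))))
    (hpre : Pre_separate_hier_by_tiers h) :
    separate_hier_by_tiers h
      = pvCanon (((h.headD ("", [])).2.headD []).map Prod.fst) h := by
  obtain ⟨hne, hnd, hfne, hent⟩ := hpre
  cases h with
  | nil => exact absurd rfl hne
  | cons p r =>
  obtain ⟨k0, v0⟩ := p
  cases v0 with
  | nil => exact absurd rfl hfne
  | cons e0 es =>
  have htnd : (e0.map Prod.fst).Nodup :=
    (hent (k0, e0 :: es) (List.mem_cons_self ..) e0 (List.mem_cons_self ..)).1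
  simp only [separate_hier_by_tiers]
  rw [pv_first _ (by simp)]
  simp only [List.headD_cons]
  simp only [PySem.Dict.keys_mk]
  rw [pv_items_map' (List.map Prod.fst e0) _ htnd]
  simp only [List.map_map, pvCanon]
  refine List.map_congr_left ?_
  intro t ht
  simp only [Function.comp_apply]
  refine congrArg (fun z => (t.1, z)) ?_
  rw [pv_items_map ((k0, e0 :: es) :: r) _ hnd]
  rw [pv_tierdict_fold]
  rw [pv_items_map _ _ (by simpa [List.map_map, Function.comp_def] using hnd)]
  simp only [List.map_map]
  refine List.map_congr_left ?_
  intro kv _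
  simp only [Function.comp_apply]
  exact congrArg (fun z => (kv.1, z)) (pv_A_string t.1 kv.2)

-- ===== B-side lemmas (B = pvCanon) =====

-- enumerate facts
theorem pv_mem_enumerate {α : Type} (xs : List α) (s : Int) (p : Int × α) :
    p ∈ PySem.List.enumerate xs s ↔ ∃ k : Nat, xs[k]? = some p.2 ∧ p.1 = s + k := by
  induction xs generalizing s with
  | nil => simp [PySem.List.enumerate_nil]
  | cons x xs ih =>
    rw [PySem.List.enumerate_cons]
    simp only [List.mem_cons, ih]
    constructor
    · rintro (rfl | ⟨k, hk, hik⟩)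
      · exact ⟨0, by simp, by simp⟩
      · exact ⟨k + 1, by simpa using hk, by push_cast at hik ⊢; omega⟩
    · rintro ⟨k, hk, hik⟩
      cases k with
      | zero =>
        left
        obtain ⟨i, a⟩ := p
        simp only [List.getElem?_cons_zero, Option.some.injEq] at hk
        simp_all
      | succ k =>
        right
        exact ⟨k, by simpa using hk, by push_cast at hik ⊢; omega⟩

theorem pv_enumerate_map {α β : Type} (g : α → β) (xs : List α) (s : Int) :
    PySem.List.enumerate (xs.map g) s = (PySem.List.enumerate xs s).map (fun p => (p.1, g p.2)) := by
  induction xs generalizing s with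
  | nil => simp [PySem.List.enumerate_nil]
  | cons x xs ih => simp [PySem.List.enumerate_cons, ih]

theorem pv_map_enumerate_snd {α β : Type} (f : α → β) (xs : List α) (s : Int) :
    (PySem.List.enumerate xs s).map (fun p => f p.2) = xs.map f := by
  induction xs generalizing s with
  | nil => simp [PySem.List.enumerate_nil]
  | cons x xs ih => simp [PySem.List.enumerate_cons, ih]

theorem pv_enumerate_pairwise {α : Type} (xs : List α) (s : Int) :
    (PySem.List.enumerate xs s).Pairwise (fun a b => a.1 < b.1) := by
  induction xs generalizing s with
  | nil => simp [PySem.List.enumerate_nil]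
  | cons x xs ih =>
    rw [PySem.List.enumerate_cons]
    refine List.Pairwise.cons ?_ (ih (s + 1))
    intro b hb
    obtain ⟨k, _, hk⟩ := (pv_mem_enumerate xs (s + 1) b).mp hb
    omega

-- pyGetD / pySetD on nonnegative indices
theorem pv_getD_nonneg {α : Type} (xs : List α) (c : Int) (hc : 0 ≤ c) (d : α) :
    PySem.List.pyGetD xs c d = xs.getD c.toNat d := by
  simp only [PySem.List.pyGetD, PySem.List.pyGet?, PySem.List.pyIdx?, if_pos hc]
  split_ifs with h
  · simp [List.getD_eq_getElem?_getD]
  · have hlen : xs.length ≤ c.toNat := by omega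
    simp [List.getD_eq_getElem?_getD, List.getElem?_eq_none hlen]

theorem pv_getD_replicate (n : Nat) (c : Int) (hc : 0 ≤ c) :
    PySem.List.pyGetD (List.replicate n "") c "" = "" := by
  rw [pv_getD_nonneg _ _ hc]
  by_cases h : c.toNat < n
  · simp [List.getD_eq_getElem?_getD, h]
  · have hlen : (List.replicate n ("" : String)).length ≤ c.toNat := by
      simpa using not_lt.mp h
    simp [List.getD_eq_getElem?_getD, List.getElem?_eq_none hlen]

theorem pv_strcat_nil : pvStrcat [] = "" := rfl

theorem pv_strcat_cons (v : String) (vs : List String) :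
    pvStrcat (v :: vs) = (" | " ++ v) ++ pvStrcat vs := by
  simp only [pvStrcat, List.map_cons, pv_join_cons]

-- one block: folding the tagged values of one cell
theorem pv_block_fold (vs : List String) (c : Int) (hc : 0 ≤ c) :
    ∀ ss : List String, (vs.map (fun v => (c, v))).foldl pvOpA ss = pvOp2 ss (c, vs) := by
  induction vs with
  | nil =>
    intro ss
    simp only [List.map_nil, List.foldl_nil, pvOp2, pv_strcat_nil, String.append_empty]
    rw [PySem.List.pySetD_of_nonneg _ _ hc, pv_getD_nonneg _ _ hc]
    by_cases hn : c.toNat < ss.length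
    · rw [List.getD_eq_getElem?_getD, List.getElem?_eq_getElem hn]
      simp
    · exact (List.set_eq_of_length_le (by omega)).symm
  | cons v vs ih =>
    intro ss
    simp only [List.map_cons, List.foldl_cons]
    rw [ih (pvOpA ss (c, v))]
    by_cases hn : c.toNat < ss.length
    · simp only [pvOpA, pvOp2, PySem.List.pySetD_of_nonneg _ _ hc, pv_getD_nonneg _ _ hc]
      rw [List.set_set]
      have h2 : (ss.set c.toNat (ss.getD c.toNat "" ++ (" | " ++ v))).getD c.toNat ""
          = ss.getD c.toNat "" ++ (" | " ++ v) := by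
        rw [List.getD_eq_getElem?_getD, List.getElem?_set_self (by simpa using hn)]
        simp
      rw [h2, pv_strcat_cons, String.append_assoc]
    · have hset : ∀ x : String, PySem.List.pySetD ss c x = ss := by
        intro x
        rw [PySem.List.pySetD_of_nonneg _ _ hc]
        exact List.set_eq_of_length_le (by omega)
      simp only [pvOpA, pvOp2, hset]

theorem pv_foldC (bs : List (Int × List String)) (ss : List String)
    (h : ∀ b ∈ bs, 0 ≤ b.1) :
    (bs.flatMap (fun b => b.2.map (fun v => (b.1, v)))).foldl pvOpA ss = bs.foldl pvOp2 ss := by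
  induction bs generalizing ss with
  | nil => rfl
  | cons a bs ih =>
    simp only [List.flatMap_cons, List.foldl_append, List.foldl_cons]
    rw [pv_block_fold a.2 a.1 (h a (List.mem_cons_self ..)) ss]
    exact ih _ (fun b hb => h b (List.mem_cons_of_mem _ hb))

theorem pv_getD_setD_ne {α : Type} (ss : List α) (c c' : Int) (x d : α)
    (hc : 0 ≤ c) (hc' : 0 ≤ c') (hne : c ≠ c') :
    PySem.List.pyGetD (PySem.List.pySetD ss c' x) c d = PySem.List.pyGetD ss c d := by
  rw [PySem.List.pySetD_of_nonneg _ _ hc', pv_getD_nonneg _ _ hc, pv_getD_nonneg _ _ hc]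
  have hnn : c'.toNat ≠ c.toNat := by omega
  rw [List.getD_eq_getElem?_getD, List.getD_eq_getElem?_getD, List.getElem?_set_ne hnn]

theorem pv_read_untouched (bs : List (Int × List String)) :
    ∀ ss : List String, ∀ c : Int, 0 ≤ c → (∀ b ∈ bs, 0 ≤ b.1 ∧ b.1 ≠ c) →
    PySem.List.pyGetD (bs.foldl pvOp2 ss) c "" = PySem.List.pyGetD ss c "" := by
  induction bs with
  | nil => intro ss c _ _; rfl
  | cons a bs ih =>
    intro ss c hc h
    simp only [List.foldl_cons]
    rw [ih _ c hc (fun b hb => h b (List.mem_cons_of_mem _ hb))]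
    obtain ⟨ha0, hane⟩ := h a (List.mem_cons_self ..)
    exact pv_getD_setD_ne ss c a.1 _ "" hc ha0 (fun e => hane e.symm)

theorem pv_read (bs : List (Int × List String)) :
    ∀ ss : List String, (bs.map Prod.fst).Nodup →
    (∀ b ∈ bs, 0 ≤ b.1 ∧ b.1 < (ss.length : Int)) → ∀ b ∈ bs,
    PySem.List.pyGetD (bs.foldl pvOp2 ss) b.1 "" = PySem.List.pyGetD ss b.1 "" ++ pvStrcat b.2 := by
  induction bs with
  | nil => intro ss _ _ b hb; cases hb
  | cons a bs ih =>
    intro ss hnd hb b hmem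
    obtain ⟨ha0, halt⟩ := hb a (List.mem_cons_self ..)
    simp only [List.map_cons, List.nodup_cons] at hnd
    obtain ⟨hafresh, hnd'⟩ := hnd
    rcases List.mem_cons.mp hmem with rfl | hmem'
    · simp only [List.foldl_cons]
      have hfresh : ∀ b' ∈ bs, 0 ≤ b'.1 ∧ b'.1 ≠ b.1 := by
        intro b' hb'
        refine ⟨(hb b' (List.mem_cons_of_mem _ hb')).1, ?_⟩
        intro he
        exact hafresh (he ▸ List.mem_map_of_mem hb')
      rw [pv_read_untouched bs (pvOp2 ss b) b.1 ha0 hfresh]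
      simp only [pvOp2, PySem.List.pySetD_of_nonneg _ _ ha0, pv_getD_nonneg _ _ ha0]
      have hn : b.1.toNat < ss.length := by omega
      rw [List.getD_eq_getElem?_getD, List.getElem?_set_self (by simpa using hn)]
      simp
    · simp only [List.foldl_cons]
      have hlen : ((pvOp2 ss a).length : Int) = (ss.length : Int) := by
        simp [pvOp2, PySem.List.length_pySetD]
      rw [ih (pvOp2 ss a) hnd'
        (fun b' hb' => ⟨(hb b' (List.mem_cons_of_mem _ hb')).1,
          by rw [hlen]; exact (hb b' (List.mem_cons_of_mem _ hb')).2⟩) b hmem']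
      congr 1
      exact pv_getD_setD_ne ss b.1 a.1 _ "" (hb b hmem).1 ha0
        (fun e => hafresh (e ▸ List.mem_map_of_mem hmem'))

-- sorted2 with fst/snd keys is sorted with the lexicographic key
theorem pv_before_eq :
    (fun (a b : Int × String) => decide (a.1 < b.1) || (!decide (b.1 < a.1) && decide (a.2 < b.2)))
      = (fun (a b : Int × String) => decide ((toLex (a.1, a.2) : Int ×ₗ String) < toLex (b.1, b.2))) := by
  funext a b
  by_cases h1 : a.1 < b.1
  · simp [h1, Prod.Lex.lt_iff]
  · by_cases h2 : b.1 < a.1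
    · have hne : a.1 ≠ b.1 := ne_of_gt h2
      simp [h1, h2, Prod.Lex.lt_iff, hne]
    · have h3 : a.1 = b.1 := le_antisymm (not_lt.mp h2) (not_lt.mp h1)
      simp [h3, Prod.Lex.lt_iff]

theorem pv_sorted2_lex (xs : List (Int × String)) :
    PySem.List.sorted2 xs (fun p => p.1) (fun p => p.2) false
      = PySem.List.sorted xs (fun p => (toLex (p.1, p.2) : Int ×ₗ String)) false := by
  rw [PySem.List.sorted_eq_foldl_insertBy]
  show xs.foldl (fun acc x => PySem.List.insertBy
      (fun a b => decide (a.1 < b.1) || (!decide (b.1 < a.1) && decide (a.2 < b.2))) x acc) []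
    = xs.foldl (fun acc x => PySem.List.insertBy
      (fun a b => decide ((toLex (a.1, a.2) : Int ×ₗ String) < toLex (b.1, b.2))) x acc) []
  rw [pv_before_eq]

-- membership characterisations
theorem pv_mem_blocks (K : Int) (T : List String)
    (hs : List (String × List (List (String × String)))) (b : Int × List String) :
    b ∈ pvBlocks K T hs ↔ ∃ (tn kn : Nat) (t : String) (kv : String × List (List (String × String))),
      T[tn]? = some t ∧ hs[kn]? = some kv ∧ b = ((tn : Int) * K + (kn : Int), pvSorted t kv.2) := by
  unfold pvBlocks
  simp only [List.mem_flatMap, List.mem_map, pv_mem_enumerate]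
  constructor
  · rintro ⟨tit, ⟨tk, htk, hti⟩, kie, ⟨kk, hkk, hki⟩, rfl⟩
    refine ⟨tk, kk, tit.2, kie.2, htk, hkk, ?_⟩
    rw [hti, hki]; simp
  · rintro ⟨tn, kn, t, kv, ht, hk, rfl⟩
    exact ⟨((tn : Int), t), ⟨tn, ht, by simp⟩, ((kn : Int), kv), ⟨kn, hk, by simp⟩, by simp⟩

theorem pv_mem_pvC (K : Int) (T : List String)
    (hs : List (String × List (List (String × String)))) (p : Int × String) :
    p ∈ pvC K T hs ↔ ∃ (tn kn : Nat) (t : String) (kv : String × List (List (String × String)))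
      (e : List (String × String)),
      T[tn]? = some t ∧ hs[kn]? = some kv ∧ e ∈ kv.2 ∧ p = ((tn : Int) * K + (kn : Int), pvVal t e) := by
  unfold pvC
  simp only [List.mem_flatMap, pv_mem_blocks, List.mem_map]
  constructor
  · rintro ⟨b, ⟨tn, kn, t, kv, ht, hk, rfl⟩, v, hv, rfl⟩
    simp only [pvSorted, PySem.List.mem_sorted, PySem.Set.mem_ofList, List.mem_map] at hv
    obtain ⟨e, he, rfl⟩ := hv
    exact ⟨tn, kn, t, kv, e, ht, hk, he, rfl⟩
  · rintro ⟨tn, kn, t, kv, e, ht, hk, he, rfl⟩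
    refine ⟨((tn : Int) * K + (kn : Int), pvSorted t kv.2), ⟨tn, kn, t, kv, ht, hk, rfl⟩,
      pvVal t e, ?_, rfl⟩
    simp only [pvSorted, PySem.List.mem_sorted, PySem.Set.mem_ofList, List.mem_map]
    exact ⟨e, he, rfl⟩

theorem pv_mem_pvLflat (K : Int) (T : List String)
    (hs : List (String × List (List (String × String)))) (p : Int × String) :
    p ∈ pvLflat K T hs ↔ ∃ (tn kn : Nat) (t : String) (kv : String × List (List (String × String)))
      (e : List (String × String)),
      T[tn]? = some t ∧ hs[kn]? = some kv ∧ e ∈ kv.2 ∧ p = ((tn : Int) * K + (kn : Int), pvVal t e) := by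
  unfold pvLflat
  simp only [List.mem_flatMap, List.mem_map, pv_mem_enumerate]
  constructor
  · rintro ⟨kie, ⟨kk, hkk, hki⟩, e, he, tit, ⟨tk, htk, hti⟩, rfl⟩
    refine ⟨tk, kk, tit.2, kie.2, e, htk, hkk, he, ?_⟩
    rw [hti, hki]; simp
  · rintro ⟨tn, kn, t, kv, e, ht, hk, he, rfl⟩
    exact ⟨((kn : Int), kv), ⟨kn, hk, by simp⟩, e, he, ((tn : Int), t), ⟨tn, ht, by simp⟩, by simp⟩

-- pairwise/order facts for the blocks and pvC
theorem pv_blocks_pairwise (T : List String)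
    (hs : List (String × List (List (String × String)))) :
    (pvBlocks (hs.length : Int) T hs).Pairwise (fun a b => a.1 < b.1) := by
  unfold pvBlocks
  rw [List.flatMap_def, List.pairwise_flatten]
  constructor
  · intro l hl
    obtain ⟨tit, _, rfl⟩ := List.mem_map.mp hl
    refine List.pairwise_map.mpr ?_
    refine List.Pairwise.imp ?_ (pv_enumerate_pairwise hs 0)
    intro a b hab
    dsimp only
    exact Int.add_lt_add_left hab _
  · refine List.pairwise_map.mpr ?_
    refine (pv_enumerate_pairwise T 0).imp_of_mem ?_
    intro tit tit' hmem hmem' hlt x hx y hy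
    obtain ⟨kie, hkie, rfl⟩ := List.mem_map.mp hx
    obtain ⟨kie', hkie', rfl⟩ := List.mem_map.mp hy
    obtain ⟨kk, hkk, hki⟩ := (pv_mem_enumerate hs 0 kie).mp hkie
    obtain ⟨kk', hkk', hki'⟩ := (pv_mem_enumerate hs 0 kie').mp hkie'
    have hkb : kk < hs.length := (List.getElem?_eq_some_iff.mp hkk).1
    have h1 : (0 : Int) ≤ kie.1 := by omega
    have h2 : kie.1 < (hs.length : Int) := by
      have : (kk : Int) < (hs.length : Int) := by exact_mod_cast hkb
      omega
    have h3 : (0 : Int) ≤ kie'.1 := by omega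
    have h4 : tit.1 + 1 ≤ tit'.1 := by omega
    have h5 : (tit.1 + 1) * (hs.length : Int) ≤ tit'.1 * (hs.length : Int) :=
      mul_le_mul_of_nonneg_right h4 (by positivity)
    dsimp only
    nlinarith [h5]

theorem pv_blocks_fst_nodup (T : List String)
    (hs : List (String × List (List (String × String)))) :
    ((pvBlocks (hs.length : Int) T hs).map Prod.fst).Nodup := by
  refine List.pairwise_map.mpr ?_
  exact (pv_blocks_pairwise T hs).imp (fun hab => ne_of_lt hab)

theorem pv_blocks_bounds (T : List String)
    (hs : List (String × List (List (String × String)))) :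
    ∀ b ∈ pvBlocks (hs.length : Int) T hs,
      0 ≤ b.1 ∧ b.1 < ((T.length * hs.length : Nat) : Int) := by
  intro b hb
  obtain ⟨tn, kn, t, kv, ht, hk, rfl⟩ := (pv_mem_blocks _ T hs b).mp hb
  have h1 : tn < T.length := (List.getElem?_eq_some_iff.mp ht).1
  have h2 : kn < hs.length := (List.getElem?_eq_some_iff.mp hk).1
  have h1' : ((tn : Int) + 1) ≤ (T.length : Int) := by exact_mod_cast h1
  have h2' : ((kn : Int)) < (hs.length : Int) := by exact_mod_cast h2
  have h5 : ((tn : Int) + 1) * (hs.length : Int) ≤ (T.length : Int) * (hs.length : Int) :=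
    mul_le_mul_of_nonneg_right h1' (by positivity)
  constructor
  · dsimp only; positivity
  · dsimp only; push_cast; nlinarith [h5]

theorem pv_C_pairwise (T : List String)
    (hs : List (String × List (List (String × String)))) :
    (pvC (hs.length : Int) T hs).Pairwise
      (fun p q => (toLex (p.1, p.2) : Int ×ₗ String) < toLex (q.1, q.2)) := by
  unfold pvC
  rw [List.flatMap_def, List.pairwise_flatten]
  constructor
  · intro l hl
    obtain ⟨b, hb, rfl⟩ := List.mem_map.mp hl
    obtain ⟨tn, kn, t, kv, _, _, rfl⟩ := (pv_mem_blocks _ T hs b).mp hb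
    refine List.pairwise_map.mpr ?_
    refine List.Pairwise.imp ?_ (PySem.List.sorted_ofList_pairwise_lt _)
    intro a b hab
    exact Prod.Lex.lt_iff.mpr (Or.inr ⟨rfl, hab⟩)
  · refine List.pairwise_map.mpr ?_
    refine (pv_blocks_pairwise T hs).imp ?_
    intro a b hab x hx y hy
    obtain ⟨v, _, rfl⟩ := List.mem_map.mp hx
    obtain ⟨w, _, rfl⟩ := List.mem_map.mp hy
    exact Prod.Lex.lt_iff.mpr (Or.inl hab)

theorem pv_C_nodup (T : List String)
    (hs : List (String × List (List (String × String)))) :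
    (pvC (hs.length : Int) T hs).Nodup := by
  refine (pv_C_pairwise T hs).imp ?_
  intro a b hab he
  rw [he] at hab
  exact lt_irrefl _ hab

theorem pv_sorted_pairs (T : List String)
    (hs : List (String × List (List (String × String)))) :
    PySem.List.sorted (PySem.Set.ofList (pvLflat (hs.length : Int) T hs))
        (fun p => (toLex (p.1, p.2) : Int ×ₗ String)) false
      = pvC (hs.length : Int) T hs := by
  refine PySem.List.sorted_eq_of_perm_of_pairwise_lt _ _ _ ?_ (pv_C_pairwise T hs)
  refine (List.perm_ext_iff_of_nodup (pv_C_nodup T hs) (PySem.Set.nodup_ofList _)).mpr ?_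
  intro p
  rw [PySem.Set.mem_ofList, pv_mem_pvC, pv_mem_pvLflat]

-- the pairs-building triple loop is the set of the flat pair list
theorem pv_pairs_fold (K : Int) (T : List String)
    (hs : List (String × List (List (String × String)))) :
    (PySem.List.enumerate (hs.map (fun x => x.2))).foldl
      (fun pairs kiEntries =>
        kiEntries.2.foldl
          (fun pairs entry =>
            (PySem.List.enumerate T).foldl
              (fun (pairs : PySem.Set (Int × String)) tit =>
                PySem.Set.add pairs (tit.1 * K + kiEntries.1, (PySem.Dict.mk entry).getD tit.2 ""))
              pairs)
          pairs)
      PySem.Set.empty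
    = PySem.Set.ofList (pvLflat K T hs) := by
  rw [PySem.Set.ofList_eq_foldl]
  unfold pvLflat
  rw [pv_enumerate_map]
  simp only [List.flatMap_def, List.foldl_flatten, List.foldl_map, pvVal]
  rfl

theorem pv_foldC' (K : Int) (T : List String)
    (hs : List (String × List (List (String × String)))) (hK : 0 ≤ K) (init : List String) :
    (pvC K T hs).foldl pvOpA init = (pvBlocks K T hs).foldl pvOp2 init := by
  unfold pvC
  refine pv_foldC _ _ ?_
  intro b hb
  obtain ⟨tn, kn, t, kv, _, _, rfl⟩ := (pv_mem_blocks K T hs b).mp hb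
  dsimp only
  positivity

-- ===== assembling B =====
theorem pv_map_enum_fst {α β : Type} (xs : List α) (s : Int) (F : Int × α → β) :
    (List.map (Prod.fst ∘ fun tit => (tit.2, F tit)) (PySem.List.enumerate xs s)) = xs := by
  induction xs generalizing s with
  | nil => simp [PySem.List.enumerate_nil]
  | cons x xs ih => simp [PySem.List.enumerate_cons, ih]

theorem pv_nodup_helper {α β : Type} (xs : List α) (s : Int) (F : Int × α → β)
    (h : xs.Nodup) :
    (List.map (Prod.fst ∘ fun tit => (tit.2, F tit)) (PySem.List.enumerate xs s)).Nodup := by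
  rw [pv_map_enum_fst]; exact h

theorem pv_eta1 : (fun x : String × String => x.1) = (Prod.fst : String × String → String) := rfl
theorem pv_eta2 : (fun x : String × List (List (String × String)) => x.1)
    = (Prod.fst : String × List (List (String × String)) → String) := rfl

theorem pv_B_canon (h : List (String × List (List (String × String))))
    (hpre : Pre_separate_hier_by_tiers h) :
    separate_hier_by_tiers_alt h
      = pvCanon (((h.headD ("", [])).2.headD []).map Prod.fst) h := by
  obtain ⟨hne, hnd, hfne, hent⟩ := hpre
  cases h with
  | nil => exact absurd rfl hne
  | cons p r =>
  obtain ⟨k0, v0⟩ := p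
  cases v0 with
  | nil => exact absurd rfl hfne
  | cons e0 es =>
  have htnd : (e0.map Prod.fst).Nodup :=
    (hent (k0, e0 :: es) (List.mem_cons_self ..) e0 (List.mem_cons_self ..)).1
  simp only [separate_hier_by_tiers_alt]
  rw [pv_first _ (by simp)]
  simp only [List.headD_cons, PySem.Dict.keys_mk, PySem.Dict.values_mk, List.length_map]
  rw [pv_pairs_fold ((((k0, e0 :: es) :: r).length : Nat) : Int) (e0.map Prod.fst) ((k0, e0 :: es) :: r)]
  rw [pv_sorted2_lex, pv_sorted_pairs]
  have hopA : (fun (ss : List String) (cv : Int × String) =>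
      PySem.List.pySetD ss cv.1 (PySem.List.pyGetD ss cv.1 "" ++ (" | " ++ cv.2))) = pvOpA := rfl
  rw [hopA, pv_foldC' _ _ _ (by positivity)]
  simp only [pv_eta1, pv_eta2]
  rw [pv_items_ofList _ (by rw [List.map_map]; exact pv_nodup_helper _ _ _ htnd)]
  unfold pvCanon
  rw [← pv_map_enumerate_snd
    (fun t => (t, ((k0, e0 :: es) :: r).map (fun kv => (kv.1, pvStr t kv.2))))
    (e0.map Prod.fst) 0]
  refine List.map_congr_left ?_
  intro tit htit
  obtain ⟨tn, htn, hti⟩ := (pv_mem_enumerate _ 0 tit).mp htit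
  rw [zero_add] at hti
  refine congrArg (fun z => (tit.2, z)) ?_
  rw [pv_items_ofList _ (by rw [List.map_map]; exact pv_nodup_helper _ _ _ hnd)]
  rw [pv_enumerate_map Prod.fst ((k0, e0 :: es) :: r) 0, List.map_map]
  rw [← pv_map_enumerate_snd
    (fun kv : String × List (List (String × String)) => (kv.1, pvStr tit.2 kv.2))
    ((k0, e0 :: es) :: r) 0]
  refine List.map_congr_left ?_
  intro kik hkik
  obtain ⟨kn, hkn, hki⟩ := (pv_mem_enumerate _ 0 kik).mp hkik
  rw [zero_add] at hki
  refine congrArg (fun z => (kik.2.1, z)) ?_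
  have hb0 : ((tn : Int) * ((((k0, e0 :: es) :: r).length : Nat) : Int) + (kn : Int),
      pvSorted tit.2 kik.2.2) ∈ pvBlocks ((((k0, e0 :: es) :: r).length : Nat) : Int)
        (e0.map Prod.fst) ((k0, e0 :: es) :: r) := by
    rw [pv_mem_blocks]
    exact ⟨tn, kn, tit.2, kik.2, htn, hkn, rfl⟩
  have hread := pv_read
    (pvBlocks ((((k0, e0 :: es) :: r).length : Nat) : Int) (e0.map Prod.fst) ((k0, e0 :: es) :: r))
    (List.replicate (e0.length * ((k0, e0 :: es) :: r).length) "")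
    (pv_blocks_fst_nodup _ _)
    (by
      intro b hb
      rcases pv_blocks_bounds (e0.map Prod.fst) ((k0, e0 :: es) :: r) b hb with ⟨hb1, hb2⟩
      refine ⟨hb1, ?_⟩
      simpa using hb2)
    _ hb0
  rw [hti, hki]
  rw [hread]
  rw [pv_getD_replicate _ _ (by positivity)]
  rw [String.empty_append]
  rfl

-- ===== VERDICT (by name: the statement is the Claim_ definition above) =====
theorem separate_hier_by_tiers_spec : Claim_equal_separate_hier_by_tiers := by
  intro h _ hpre
  unfold Spec_separate_hier_by_tiers
  rw [pv_A_canon h hpre, pv_B_canon h hpre]
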